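-- pv_equiv track=rewrite | github.com/TheApeMachine/cogos | cogos/tools.py | _domain_allowed
-- ===== SOURCE A (Python) =====
-- from typing import Any, Callable, ClassVar, Dict, List, Optional, Sequence
--
-- def _normalize_domain(d: str) -> str:
--     d = (d or "").strip().lower()
--     if d.startswith("www."):
--         d = d[4:]
--     return d
--
-- def _domain_matches(domain: str, suffix: str) -> bool:
--     domain = _normalize_domain(domain)
--     suffix = _normalize_domain(suffix)
--     if not suffix:
--         return False
--     return domain == suffix or domain.endswith("." + suffix)
--
-- def _domain_allowed(domain: str, allow: Sequence[str], deny: Sequence[str]) -> bool: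
--     domain = _normalize_domain(domain)
--     if any(_domain_matches(domain, d) for d in deny if d):
--         return False
--     allow_clean = [a for a in allow if a]
--     if not allow_clean:
--         return True
--     return any(_domain_matches(domain, a) for a in allow_clean)
-- ===== SOURCE B (Python) =====
-- from typing import Sequence
--
-- def _normalize_domain(d: str) -> str:
--     d = (d or "").strip().lower()
--     if d.startswith("www."):
--         d = d[4:]
--     return d
--
-- def _suffix_match(suffixes: set, entry: str) -> bool:
--     s = _normalize_domain(entry)
--     return bool(s) and s in suffixes
--
-- def _domain_allowed(domain: str, allow: Sequence[str], deny: Sequence[str]) -> bool: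
--     # The matcher normalizes the (already normalized) domain once more, so match
--     # against the twice-normalized domain.
--     d = _normalize_domain(_normalize_domain(domain))
--     # Set of all dot-boundary suffixes of d (including d itself); replaces the
--     # per-entry endswith scans with a single precomputed set + O(1) lookups.
--     suffixes = {d[i + 1:] for i, ch in enumerate(d) if ch == "."}
--     suffixes.add(d)
--     for entry in deny:
--         if _suffix_match(suffixes, entry):
--             return False
--     allow_clean = [a for a in allow if a]
--     if not allow_clean:
--         return True
--     return any(_suffix_match(suffixes, a) for a in allow_clean)
-- ===== Notes on version B (the rewrite author's own statement) =====
-- stated objective: faster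
-- what changed: B precomputes the set of the normalized domain's dot-boundary suffixes once and decides each allow/deny entry by a single set lookup, instead of A's per-entry string building and endswith scans over the domain.
import Mathlib
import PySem

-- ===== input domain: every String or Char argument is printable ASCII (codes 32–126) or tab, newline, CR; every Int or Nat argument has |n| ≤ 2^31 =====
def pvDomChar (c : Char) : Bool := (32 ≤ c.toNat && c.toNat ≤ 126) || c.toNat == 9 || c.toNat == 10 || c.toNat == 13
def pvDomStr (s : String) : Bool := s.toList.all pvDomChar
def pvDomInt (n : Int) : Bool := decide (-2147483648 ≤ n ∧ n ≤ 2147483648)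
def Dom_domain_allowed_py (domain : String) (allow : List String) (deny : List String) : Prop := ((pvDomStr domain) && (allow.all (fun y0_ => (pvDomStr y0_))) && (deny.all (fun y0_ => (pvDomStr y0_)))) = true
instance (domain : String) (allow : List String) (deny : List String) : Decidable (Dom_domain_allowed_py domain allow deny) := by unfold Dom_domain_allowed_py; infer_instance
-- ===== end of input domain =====

-- B replaces A's per-entry endswith scans by one precomputed set of the domain's
-- dot-boundary suffixes plus a set lookup per entry (objective: faster, as measured
-- in a timing run on generated inputs).

-- ===== PORT A =====
-- _normalize_domain: (d or "").strip().lower(), then drop a leading "www.".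
-- ('d or ""' is the identity for strip on the string domain, so it is not re-modelled.)
def pvNormalizeL (d : List Char) : List Char :=
  let d := PySem.Chars.lower (PySem.Chars.strip d)
  if PySem.Chars.startswith d ("www.".toList) then PySem.List.slice d (some 4) none else d

-- _domain_matches
def pvMatchesL (domain suffix : List Char) : Bool :=
  let domain := pvNormalizeL domain
  let suffix := pvNormalizeL suffix
  if suffix.isEmpty then false
  else domain == suffix || PySem.Chars.endswith domain ('.' :: suffix)

def domain_allowed_py (domain : String) (allow : List String) (deny : List String) : Bool :=
  let d := pvNormalizeL domain.toList
  if (deny.filter (fun e => !e.toList.isEmpty)).any (fun e => pvMatchesL d e.toList) then false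
  else
    let allow_clean := allow.filter (fun a => !a.toList.isEmpty)
    if allow_clean.isEmpty then true
    else allow_clean.any (fun a => pvMatchesL d a.toList)

-- ===== PORT B =====
-- {d[i+1:] for i, ch in enumerate(d) if ch == "."} ∪ {d}
def pvSuffixSet (d : List Char) : PySem.Set (List Char) :=
  PySem.Set.add
    (PySem.Set.ofList
      (((PySem.List.enumerate d).filter (fun p => p.2 == '.')).map
        (fun p => PySem.List.slice d (some (p.1 + 1)) none))) d

-- _suffix_match
def pvSuffixMatch (suffixes : PySem.Set (List Char)) (entry : List Char) : Bool :=
  let s := pvNormalizeL entry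
  !s.isEmpty && PySem.Set.contains suffixes s

def domain_allowed_py_alt (domain : String) (allow : List String) (deny : List String) : Bool :=
  let d := pvNormalizeL (pvNormalizeL domain.toList)
  let suffixes := pvSuffixSet d
  if deny.any (fun e => pvSuffixMatch suffixes e.toList) then false
  else
    let allow_clean := allow.filter (fun a => !a.toList.isEmpty)
    if allow_clean.isEmpty then true
    else allow_clean.any (fun a => pvSuffixMatch suffixes a.toList)

-- ===== PRECONDITION & SPEC =====
def Spec_domain_allowed_py (domain : String) (allow : List String) (deny : List String) (out : Bool) : Prop := out = domain_allowed_py_alt domain allow deny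
instance (domain : String) (allow : List String) (deny : List String) (out : Bool) : Decidable (Spec_domain_allowed_py domain allow deny out) := by unfold Spec_domain_allowed_py; infer_instance

-- ===== CLAIM (what is proved, stated in full; the proofs are below) =====
def Claim_equal_domain_allowed_py : Prop := ∀ (domain : String) (allow : List String) (deny : List String), Dom_domain_allowed_py domain allow deny → Spec_domain_allowed_py domain allow deny (domain_allowed_py domain allow deny)

-- ===== LEMMAS AND PROOFS =====

lemma pv_mem_enumerate_iff {α : Type} (xs : List α) (k : Int) (p : Int × α) :
    p ∈ PySem.List.enumerate xs k ↔ ∃ n : Nat, ∃ h : n < xs.length, p = ((k + n : Int), xs[n]) := by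
  induction xs generalizing k with
  | nil => simp [PySem.List.enumerate]
  | cons x t ih =>
    simp only [PySem.List.enumerate, List.mem_cons, ih (k + 1)]
    constructor
    · rintro (rfl | ⟨n, h, rfl⟩)
      · exact ⟨0, by simp, by simp⟩
      · refine ⟨n + 1, by simpa using h, ?_⟩
        simp only [Prod.mk.injEq, List.getElem_cons_succ]
        exact ⟨by push_cast; ring, trivial⟩
    · rintro ⟨n, h, rfl⟩
      cases n with
      | zero => left; simp
      | succ m =>
        right
        refine ⟨m, by simpa using h, ?_⟩
        simp only [Prod.mk.injEq, List.getElem_cons_succ]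
        exact ⟨by push_cast; ring, trivial⟩

lemma pv_cons_suffix_iff (d s : List Char) :
    ('.' :: s) <:+ d ↔ ∃ n : Nat, ∃ h : n < d.length, d[n] = '.' ∧ s = d.drop (n + 1) := by
  constructor
  · rintro ⟨t, rfl⟩
    refine ⟨t.length, by simp, ?_, ?_⟩
    · simp
    · rw [List.drop_append]
      simp
  · rintro ⟨n, h, hc, rfl⟩
    exact ⟨d.take n, by
      conv_rhs => rw [← List.take_append_drop n d]
      rw [List.drop_eq_getElem_cons h, hc]⟩

lemma pv_contains_pvSuffixSet (d s : List Char) (hs : s ≠ []) :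
    PySem.Set.contains (pvSuffixSet d) s = (d == s || PySem.Chars.endswith d ('.' :: s)) := by
  rw [Bool.eq_iff_iff]
  rw [PySem.Set.contains_iff]
  unfold pvSuffixSet
  rw [PySem.Set.mem_add, PySem.Set.mem_ofList]
  simp only [List.mem_map, List.mem_filter, Bool.or_eq_true, beq_iff_eq,
    PySem.Chars.endswith_iff, pv_cons_suffix_iff]
  constructor
  · rintro (⟨p, ⟨hp, hdot⟩, rfl⟩ | rfl)
    · obtain ⟨n, hn, rfl⟩ := (pv_mem_enumerate_iff d 0 p).1 hp
      right
      refine ⟨n, hn, by simpa using hdot, ?_⟩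
      have : (0 : Int) + n + 1 = ((n + 1 : Nat) : Int) := by push_cast; ring
      rw [this, PySem.List.slice_from_natCast]
    · left; rfl
  · rintro (rfl | ⟨n, hn, hdot, rfl⟩)
    · right; rfl
    · left
      refine ⟨((n : Int), d[n]), ⟨(pv_mem_enumerate_iff d 0 _).2 ⟨n, hn, by simp⟩, by simpa using hdot⟩, ?_⟩
      have : (n : Int) + 1 = ((n + 1 : Nat) : Int) := by push_cast; ring
      rw [this, PySem.List.slice_from_natCast]

lemma pv_normalize_nil : pvNormalizeL [] = [] := by decide

lemma pv_matches_eq (d e : List Char) :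
    pvMatchesL d e = pvSuffixMatch (pvSuffixSet (pvNormalizeL d)) e := by
  by_cases h : pvNormalizeL e = []
  · simp [pvMatchesL, pvSuffixMatch, h]
  · have hc := pv_contains_pvSuffixSet (pvNormalizeL d) (pvNormalizeL e) h
    rw [show pvMatchesL d e = (if (pvNormalizeL e).isEmpty then false else (pvNormalizeL d == pvNormalizeL e || PySem.Chars.endswith (pvNormalizeL d) ('.' :: pvNormalizeL e))) from rfl,
       show pvSuffixMatch (pvSuffixSet (pvNormalizeL d)) e = (!(pvNormalizeL e).isEmpty && PySem.Set.contains (pvSuffixSet (pvNormalizeL d)) (pvNormalizeL e)) from rfl,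
       hc]
    simp [List.isEmpty_iff, h]

theorem pv_main (domain : String) (allow : List String) (deny : List String) :
    domain_allowed_py domain allow deny = domain_allowed_py_alt domain allow deny := by
  simp only [domain_allowed_py, domain_allowed_py_alt]
  have key : ∀ e : String, (!e.toList.isEmpty && pvMatchesL (pvNormalizeL domain.toList) e.toList)
      = pvSuffixMatch (pvSuffixSet (pvNormalizeL (pvNormalizeL domain.toList))) e.toList := by
    intro e
    by_cases h : e.toList = []
    · rw [h, pv_matches_eq]
      simp [pvSuffixMatch, pv_normalize_nil]
    · rw [pv_matches_eq]
      simp [h]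
  have hdeny : (deny.filter (fun e => !e.toList.isEmpty)).any
      (fun e => pvMatchesL (pvNormalizeL domain.toList) e.toList)
      = deny.any (fun e => pvSuffixMatch (pvSuffixSet (pvNormalizeL (pvNormalizeL domain.toList))) e.toList) := by
    rw [List.any_filter]
    exact congrArg _ (funext key)
  have hallow : (allow.filter (fun a => !a.toList.isEmpty)).any
      (fun a => pvMatchesL (pvNormalizeL domain.toList) a.toList)
      = (allow.filter (fun a => !a.toList.isEmpty)).any
      (fun a => pvSuffixMatch (pvSuffixSet (pvNormalizeL (pvNormalizeL domain.toList))) a.toList) :=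
    congrArg _ (funext (fun a => pv_matches_eq _ _))
  rw [hdeny, hallow]

-- ===== VERDICT (by name: the statement is the Claim_ definition above) =====
theorem domain_allowed_py_spec : Claim_equal_domain_allowed_py := by
  intro domain allow deny _
  unfold Spec_domain_allowed_py
  exact pv_main domain allow deny
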